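-- pv_equiv track=rewrite | github.com/philipp-merk-neuravity/prompt_engineering | src/utils/data_conversion.py | parse_first_func
-- ===== SOURCE A (Python) =====
-- def parse_first_func(code: str) -> str:
--     # Split the code into lines
--     code_lines = code.split("\n")
--
--     # Initialize variables to track the start and end of the function
--     def_i = -1
--     end_i = None
--
--     # Iterate over the lines to find the function definition and its end
--     for i, line in enumerate(code_lines):
--         if line.startswith("def ") and def_i == -1:
--             def_i = i  # Mark the start of the function
--         elif line.strip() == "" and def_i != -1 and end_i is None:
--             # A blank line might indicate the end of the function, but it's not reliable
--             continue
--         elif def_i != -1 and (line.startswith("def ") or i == len(code_lines) - 1):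
--             # If another function definition starts or we reach the end of the code block
--             end_i = i if line.startswith("def ") else i + 1
--             break
--
--     # Return None if no function definition is found
--     if def_i == -1:
--         return None
--
--     # Correctly join and return the function's code
--     return "\n".join(code_lines[def_i:end_i])
-- ===== SOURCE B (Python) =====
-- def parse_first_func(code: str) -> str:
--     # Backward traversal building the answer back-to-front: `chunk` holds the lines
--     # from the current position up to (not including) the next "def " line; each
--     # "def " line seen overwrites the answer, so the last overwrite (the first def
--     # in forward order) wins.
--     chunk = []
--     ans = None
--     for line in reversed(code.split("\n")):
--         if line.startswith("def "):
--             ans = [line] + chunk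
--             chunk = []
--         else:
--             chunk = [line] + chunk
--     return "\n".join(ans) if ans is not None else None
-- ===== Notes on version B (the rewrite author's own statement) =====
-- stated objective: alternative
-- what changed: Replaced A's forward stateful scan (def_i/end_i bookkeeping with continue/break and a last-line special case) by a single backward traversal that builds the result back-to-front: a running chunk of lines up to the next 'def ' line, overwritten at each 'def ' line so the first def in forward order wins.
import Mathlib
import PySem

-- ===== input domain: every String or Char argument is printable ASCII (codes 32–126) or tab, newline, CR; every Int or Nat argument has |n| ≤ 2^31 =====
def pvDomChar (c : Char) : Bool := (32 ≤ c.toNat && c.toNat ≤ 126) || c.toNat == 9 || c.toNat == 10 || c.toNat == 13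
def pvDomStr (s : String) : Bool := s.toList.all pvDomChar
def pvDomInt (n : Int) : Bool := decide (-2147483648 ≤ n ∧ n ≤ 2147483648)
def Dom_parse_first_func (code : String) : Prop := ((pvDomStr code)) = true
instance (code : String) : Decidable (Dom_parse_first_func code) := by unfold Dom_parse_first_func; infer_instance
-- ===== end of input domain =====

-- B replaces A's forward stateful scan (def_i/end_i bookkeeping with continue/break and a
-- last-line special case) by one backward traversal building the result back-to-front;
-- objective: alternative.

-- ===== PORT A =====
-- A's for-loop: state (def_i, end_i), break modelled by returning; i is the enumerate index, n = len(code_lines)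
def pvALoop : List String → Nat → Nat → Int → Option Int → Int × Option Int
  | [], _, _, def_i, end_i => (def_i, end_i)
  | line :: rest, i, n, def_i, end_i =>
    if PySem.Str.startswith line "def " && (def_i == -1) then
      pvALoop rest (i + 1) n (i : Int) end_i
    else if (PySem.Str.strip line == "") && (def_i != -1) && end_i.isNone then
      pvALoop rest (i + 1) n def_i end_i
    else if (def_i != -1) && (PySem.Str.startswith line "def " || i == n - 1) then
      (def_i, some (if PySem.Str.startswith line "def " then (i : Int) else (i : Int) + 1))
    else
      pvALoop rest (i + 1) n def_i end_i

def parse_first_func (code : String) : Option String :=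
  let code_lines := (PySem.Str.split? code "\n").getD []   -- sep "\n" ≠ "", so split? is always `some`; getD [] unreachable
  let r := pvALoop code_lines 0 code_lines.length (-1) none
  if r.1 == -1 then none
  else some (PySem.Str.join "\n" (PySem.List.slice code_lines (some r.1) r.2))

-- ===== PORT B =====
-- Source B's backward loop over reversed(lines) = structural right recursion on the list;
-- the pair (chunk, ans) is Source B's loop state after processing this suffix
def pvScanR : List String → List String × Option (List String)
  | [] => ([], none)
  | line :: rest =>
    let p := pvScanR rest
    if PySem.Str.startswith line "def " then ([], some (line :: p.1))
    else (line :: p.1, p.2)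

def parse_first_func_alt (code : String) : Option String :=
  let lines := (PySem.Str.split? code "\n").getD []        -- sep "\n" ≠ "", so split? is always `some`; getD [] unreachable
  match (pvScanR lines).2 with
  | none => none
  | some ans => some (PySem.Str.join "\n" ans)

-- ===== PRECONDITION & SPEC =====
def Spec_parse_first_func (code : String) (out : Option String) : Prop := out = parse_first_func_alt code
instance (code : String) (out : Option String) : Decidable (Spec_parse_first_func code out) := by unfold Spec_parse_first_func; infer_instance

-- ===== CLAIM (what is proved, stated in full; the proofs are below) =====
def Claim_equal_parse_first_func : Prop := ∀ (code : String), Dom_parse_first_func code → Spec_parse_first_func code (parse_first_func code)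

-- ===== LEMMAS AND PROOFS =====

-- proof-only helper: first index ≥ i of a line starting with "def ", scanning xs as lines[i:]
def pvFindDefFrom : List String → Nat → Option Nat
  | [], _ => none
  | line :: rest, i => if PySem.Str.startswith line "def " then some i else pvFindDefFrom rest (i + 1)

lemma strip_def_ne (l : String) (h : PySem.Str.startswith l "def " = true) :
    (PySem.Str.strip l == "") = false := by
  rw [PySem.Str.startswith_eq, PySem.Chars.startswith_iff] at h
  obtain ⟨t, ht⟩ := h
  apply beq_false_of_ne
  intro he
  have h2 : (PySem.Str.strip l).toList = [] := by rw [he]; rfl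
  rw [PySem.Str.toList_strip] at h2
  unfold PySem.Chars.strip PySem.Chars.rstrip PySem.Chars.lstrip at h2
  rw [← ht] at h2
  simp [List.dropWhile_eq_nil_iff, show PySem.Chars.isspace 'd' = false from by decide] at h2
  exact absurd (h2 'd' (by simp)) (by decide)

lemma pvFindDefFrom_ge : ∀ (xs : List String) (i s : Nat), pvFindDefFrom xs i = some s → i ≤ s := by
  intro xs
  induction xs with
  | nil => intro i s h; cases h
  | cons l rest ih =>
    intro i s h
    by_cases hd : PySem.Chars.startswith l.toList ['d', 'e', 'f', ' '] = true
    · simp [pvFindDefFrom, hd] at h; omega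
    · have hd' : PySem.Chars.startswith l.toList ['d', 'e', 'f', ' '] = false := by simpa using hd
      simp [pvFindDefFrom, hd'] at h
      have := ih (i + 1) s h
      omega

lemma pvTakeWhile_eq : ∀ (xs : List String) (i : Nat),
    xs.takeWhile (fun l => !PySem.Str.startswith l "def ")
      = xs.take ((pvFindDefFrom xs i).getD (i + xs.length) - i) := by
  intro xs
  induction xs with
  | nil => intro i; simp [pvFindDefFrom]
  | cons l rest ih =>
    intro i
    by_cases hd : PySem.Chars.startswith l.toList ['d', 'e', 'f', ' '] = true
    · simp [List.takeWhile, pvFindDefFrom, PySem.Str.startswith_eq, hd]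
    · have hd' : PySem.Chars.startswith l.toList ['d', 'e', 'f', ' '] = false := by simpa using hd
      have hge : i + 1 ≤ (pvFindDefFrom rest (i + 1)).getD (i + 1 + rest.length) := by
        cases hf : pvFindDefFrom rest (i + 1) with
        | none => simp
        | some s => simpa using pvFindDefFrom_ge rest (i + 1) s hf
      have hstep : pvFindDefFrom (l :: rest) i = pvFindDefFrom rest (i + 1) := by
        simp [pvFindDefFrom, hd']
      have htk : (l :: rest).takeWhile (fun l => !PySem.Str.startswith l "def ")
          = l :: rest.takeWhile (fun l => !PySem.Str.startswith l "def ") := by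
        simp [List.takeWhile, PySem.Str.startswith_eq, hd']
      have hlen : i + (l :: rest).length = i + 1 + rest.length := by simp; omega
      rw [hstep, hlen, htk, ih (i + 1)]
      have h1 : (pvFindDefFrom rest (i + 1)).getD (i + 1 + rest.length) - i
          = ((pvFindDefFrom rest (i + 1)).getD (i + 1 + rest.length) - (i + 1)) + 1 := by omega
      rw [h1, List.take_succ_cons]

lemma pvScanR_chunk : ∀ (xs : List String),
    (pvScanR xs).1 = xs.takeWhile (fun l => !PySem.Str.startswith l "def ") := by
  intro xs
  induction xs with
  | nil => rfl
  | cons l rest ih =>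
    by_cases hd : PySem.Chars.startswith l.toList ['d', 'e', 'f', ' '] = true
    · simp [pvScanR, List.takeWhile, PySem.Str.startswith_eq, hd]
    · have hd' : PySem.Chars.startswith l.toList ['d', 'e', 'f', ' '] = false := by simpa using hd
      simp [pvScanR, List.takeWhile, PySem.Str.startswith_eq, hd', ih]

lemma pvScanR_ans : ∀ (xs : List String) (i : Nat),
    (pvScanR xs).2 = (match pvFindDefFrom xs i with
      | none => none
      | some s => some ((xs.drop (s - i)).take
          ((pvFindDefFrom (xs.drop (s - i + 1)) (s + 1)).getD (i + xs.length) - s))) := by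
  intro xs
  induction xs with
  | nil => intro i; simp [pvScanR, pvFindDefFrom]
  | cons l rest ih =>
    intro i
    by_cases hd : PySem.Chars.startswith l.toList ['d', 'e', 'f', ' '] = true
    · have hfind : pvFindDefFrom (l :: rest) i = some i := by simp [pvFindDefFrom, hd]
      have hscan : (pvScanR (l :: rest)).2 = some (l :: (pvScanR rest).1) := by
        simp [pvScanR, hd]
      rw [hfind, hscan, pvScanR_chunk, pvTakeWhile_eq rest (i + 1)]
      simp only [Nat.sub_self, Nat.zero_add, List.drop_succ_cons, List.drop_zero,
        List.length_cons]
      have hge : i + 1 ≤ (pvFindDefFrom rest (i + 1)).getD (i + 1 + rest.length) := by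
        cases hf : pvFindDefFrom rest (i + 1) with
        | none => simp
        | some s => simpa using pvFindDefFrom_ge rest (i + 1) s hf
      have hlen : i + (rest.length + 1) = i + 1 + rest.length := by omega
      rw [hlen]
      have h1 : (pvFindDefFrom rest (i + 1)).getD (i + 1 + rest.length) - i
          = ((pvFindDefFrom rest (i + 1)).getD (i + 1 + rest.length) - (i + 1)) + 1 := by omega
      rw [h1, List.take_succ_cons]
    · have hd' : PySem.Chars.startswith l.toList ['d', 'e', 'f', ' '] = false := by simpa using hd
      have hfind : pvFindDefFrom (l :: rest) i = pvFindDefFrom rest (i + 1) := by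
        simp [pvFindDefFrom, hd']
      have hscan : (pvScanR (l :: rest)).2 = (pvScanR rest).2 := by
        simp [pvScanR, hd']
      rw [hfind, hscan, ih (i + 1)]
      cases hf : pvFindDefFrom rest (i + 1) with
      | none => rfl
      | some s =>
        have hge : i + 1 ≤ s := pvFindDefFrom_ge rest (i + 1) s hf
        simp only [List.length_cons]
        have h1 : s - i = (s - (i + 1)) + 1 := by omega
        have hlen : i + (rest.length + 1) = i + 1 + rest.length := by omega
        rw [h1, hlen]
        simp only [List.drop_succ_cons]

lemma pvPhase2 (rest : List String) : ∀ (i n s : Nat) (lines : List String),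
    i + rest.length = n → lines.length = n →
    (pvALoop rest i n (s : Int) none).1 = (s : Int) ∧
    PySem.List.slice lines (some (s : Int)) (pvALoop rest i n (s : Int) none).2
      = (lines.drop s).take (((pvFindDefFrom rest i).getD n) - s) := by
  induction rest with
  | nil =>
    intro i n s lines hn hlen
    refine ⟨rfl, ?_⟩
    have h1 : pvALoop [] i n (s : Int) none = ((s : Int), none) := rfl
    have h2 : (pvFindDefFrom [] i).getD n = n := rfl
    rw [h1, h2, PySem.List.slice_from_natCast]
    exact (List.take_of_length_le (by simp [hlen])).symm
  | cons l rest ih =>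
    intro i n s lines hn hlen
    simp only [List.length_cons] at hn
    have hs1 : ((s : Int) == -1) = false := by simp
    by_cases hdef : PySem.Str.startswith l "def " = true
    · have hblank := strip_def_ne l hdef
      have hdefc : PySem.Chars.startswith l.toList ['d', 'e', 'f', ' '] = true := by
        simpa using hdef
      have hstep : pvALoop (l :: rest) i n (s : Int) none = ((s : Int), some (i : Int)) := by
        simp [pvALoop, hdefc, hs1, hblank]
      have hfind : pvFindDefFrom (l :: rest) i = some i := by simp [pvFindDefFrom, hdefc]
      rw [hstep, hfind]
      exact ⟨rfl, by rw [PySem.List.slice_natCast]; rfl⟩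
    · have hdef' : PySem.Str.startswith l "def " = false := by simpa using hdef
      have hdefc : PySem.Chars.startswith l.toList ['d', 'e', 'f', ' '] = false := by
        have := hdef'
        rw [PySem.Str.startswith_eq] at this
        simpa using this
      have hfind : pvFindDefFrom (l :: rest) i = pvFindDefFrom rest (i + 1) := by
        simp [pvFindDefFrom, hdefc]
      by_cases hblank : (PySem.Str.strip l == "") = true
      · have hstep : pvALoop (l :: rest) i n (s : Int) none
            = pvALoop rest (i + 1) n (s : Int) none := by
          simp [pvALoop, hdefc, hs1, hblank]
        rw [hstep, hfind]
        exact ih (i + 1) n s lines (by omega) hlen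
      · have hblank' : (PySem.Str.strip l == "") = false := by simpa using hblank
        by_cases hlast : i = n - 1
        · have hrest : rest = [] := by
            cases rest with
            | nil => rfl
            | cons a b => exfalso; simp [List.length_cons] at hn; omega
          subst hrest
          have hstep : pvALoop [l] i n (s : Int) none = ((s : Int), some ((i : Int) + 1)) := by
            simp [pvALoop, hdefc, hs1, hblank', hlast]
          rw [hstep, hfind]
          refine ⟨rfl, ?_⟩
          have hc : (i : Int) + 1 = ((i + 1 : Nat) : Int) := by push_cast; ring
          have hfn : (pvFindDefFrom [] (i + 1)).getD n = n := rfl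
          rw [hc, PySem.List.slice_natCast, hfn]
          have hn' : n = i + 1 := by omega
          rw [hn']
        · have hin : (i == n - 1) = false := by simp [hlast]
          have hstep : pvALoop (l :: rest) i n (s : Int) none
              = pvALoop rest (i + 1) n (s : Int) none := by
            simp [pvALoop, hdefc, hs1, hblank', hin]
          rw [hstep, hfind]
          exact ih (i + 1) n s lines (by omega) hlen

lemma pvPhase1 (rest : List String) : ∀ (i : Nat) (lines : List String),
    lines.drop i = rest →
    (match pvFindDefFrom rest i with
     | none => pvALoop rest i lines.length (-1) none = (-1, none)
     | some s =>
        (pvALoop rest i lines.length (-1) none).1 = (s : Int) ∧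
        PySem.List.slice lines (some (s : Int)) (pvALoop rest i lines.length (-1) none).2
          = (lines.drop s).take
              (((pvFindDefFrom (lines.drop (s + 1)) (s + 1)).getD lines.length) - s)) := by
  induction rest with
  | nil => intro i lines _; simp [pvFindDefFrom]; rfl
  | cons l rest ih =>
    intro i lines hdrop
    have hi : i < lines.length := by
      by_contra h
      rw [List.drop_eq_nil_of_le (Nat.le_of_not_lt h)] at hdrop
      cases hdrop
    have hdrop' : lines.drop (i + 1) = rest := by
      have := congrArg List.tail hdrop
      simpa [← List.tail_drop] using this
    have hlen2 : (l :: rest).length = lines.length - i := by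
      rw [← hdrop, List.length_drop]
    by_cases hdef : PySem.Str.startswith l "def " = true
    · have hdefc : PySem.Chars.startswith l.toList ['d', 'e', 'f', ' '] = true := by
        simpa using hdef
      have hfind : pvFindDefFrom (l :: rest) i = some i := by simp [pvFindDefFrom, hdefc]
      have hstep : pvALoop (l :: rest) i lines.length (-1) none
          = pvALoop rest (i + 1) lines.length (i : Int) none := by
        simp [pvALoop, hdefc]
      rw [hfind, hstep]
      have h2 := pvPhase2 rest (i + 1) lines.length i lines
        (by simp at hlen2; omega) rfl
      refine ⟨h2.1, ?_⟩
      rw [hdrop']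
      exact h2.2
    · have hdefc : PySem.Chars.startswith l.toList ['d', 'e', 'f', ' '] = false := by
        have h' : PySem.Str.startswith l "def " = false := by simpa using hdef
        rw [PySem.Str.startswith_eq] at h'
        simpa using h'
      have hfind : pvFindDefFrom (l :: rest) i = pvFindDefFrom rest (i + 1) := by
        simp [pvFindDefFrom, hdefc]
      have hstep : pvALoop (l :: rest) i lines.length (-1) none
          = pvALoop rest (i + 1) lines.length (-1) none := by
        simp [pvALoop, hdefc]
      rw [hfind, hstep]
      exact ih (i + 1) lines hdrop'

-- ===== VERDICT (by name: the statement is the Claim_ definition above) =====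
theorem parse_first_func_spec : Claim_equal_parse_first_func := by
  unfold Claim_equal_parse_first_func
  intro code _
  unfold Spec_parse_first_func
  unfold parse_first_func parse_first_func_alt
  generalize (PySem.Str.split? code "\n").getD [] = lines
  have h := pvPhase1 lines 0 lines List.drop_zero
  have hb := pvScanR_ans lines 0
  cases hf : pvFindDefFrom lines 0 with
  | none =>
    rw [hf] at h hb
    simp only at h hb
    simp [h, hb]
  | some s =>
    rw [hf] at h hb
    simp only [Nat.sub_zero, Nat.zero_add] at h hb
    obtain ⟨h1, h2⟩ := h
    have hs : ((s : Int) == -1) = false := by simp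
    simp only [h1, h2, hs, Bool.false_eq_true, if_false, hb]
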